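-- pv_equiv track=rewrite | github.com/4th-year-group-project/Terra-Infinity | real_rivers/river_network.py | identify_trees
-- ===== SOURCE A (Python) =====
-- def identify_trees(flow_tree):
--     visited = set()
--     trees_with_edges = {}
--
--     def dfs(node, current_tree_edges, root_node):
--         visited.add(node)
--         if node in flow_tree:
--             for neighbor in flow_tree[node]:
--                 if neighbor not in visited:
--                     current_tree_edges.append((node, neighbor))  # Add edge to the list
--                     dfs(neighbor, current_tree_edges, root_node)
--
--     # Identify each tree and collect edges
--     for node in flow_tree:
--         if node not in visited:
--             current_tree_edges = []
--             dfs(node, current_tree_edges, node)  # Pass the root node as the starting point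
--             trees_with_edges[node] = current_tree_edges  # Store edges for this root node
--
--     return trees_with_edges
-- ===== SOURCE B (Python) =====
-- def identify_trees(flow_tree):
--     visited = set()
--     trees_with_edges = {}
--     for root in flow_tree:
--         if root in visited:
--             continue
--         visited.add(root)
--         edges = []
--         stack = [(root, iter(flow_tree.get(root, ())))]
--         while stack:
--             node, it = stack[-1]
--             nb = next(it, None)
--             if nb is None:
--                 stack.pop()
--             elif nb not in visited:
--                 visited.add(nb)
--                 edges.append((node, nb))
--                 stack.append((nb, iter(flow_tree.get(nb, ()))))
--         trees_with_edges[root] = edges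
--     return trees_with_edges
-- ===== Notes on version B (the rewrite author's own statement) =====
-- stated objective: alternative
-- what changed: A's nested recursive dfs helper is replaced by an explicit stack machine: frames of (node, remaining neighbours), mark-on-push and descend-immediately, so the same pre-order edge lists are produced without Python recursion (no RecursionError risk on deep graphs).
import Mathlib
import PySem

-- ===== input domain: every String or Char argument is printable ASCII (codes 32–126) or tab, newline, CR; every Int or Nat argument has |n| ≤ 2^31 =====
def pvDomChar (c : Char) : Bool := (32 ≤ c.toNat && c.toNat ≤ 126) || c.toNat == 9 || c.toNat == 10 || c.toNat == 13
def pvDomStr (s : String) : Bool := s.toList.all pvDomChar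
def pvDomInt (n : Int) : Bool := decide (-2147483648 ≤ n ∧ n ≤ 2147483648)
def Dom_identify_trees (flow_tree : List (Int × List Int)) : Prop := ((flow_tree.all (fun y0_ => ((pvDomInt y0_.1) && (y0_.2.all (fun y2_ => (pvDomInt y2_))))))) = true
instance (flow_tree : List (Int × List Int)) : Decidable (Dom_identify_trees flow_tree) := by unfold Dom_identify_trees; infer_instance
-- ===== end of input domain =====

-- B replaces A's recursive DFS by an explicit stack machine (frames = (node, remaining
-- neighbours), mark-on-push, descend immediately), same pre-order edge lists; objective:
-- alternative (no asymptotic change).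

-- ===== PORT A =====
-- Fuel bound shared by both ports: one fuel unit is spent per neighbour occurrence
-- examined, and each key's list is examined at most once, so (total neighbour count)+1
-- never runs out.  Fuel is ONLY a totality guard.
def pvFuel (flow_tree : List (Int × List Int)) : Nat :=
  1 + flow_tree.foldl (fun a kv => a + kv.2.length) 0

-- Python's recursive dfs(node, …): 'visited.add(node); if node in flow_tree: for nb …'.
-- The body of the recursive call is inlined at its (single) call site inside the
-- neighbour loop, so dfsA is the loop 'for neighbor in flow_tree[node]'.
-- 'min f1 f' is part of the totality guard: pvDfsA_fuel_le (below) shows f1 ≤ f,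
-- so it never changes the computed fuel.
def dfsA (ft : List (Int × List Int)) :
    Nat → Int → List Int → PySem.Set Int → List (Int × Int) →
    Nat × PySem.Set Int × List (Int × Int)
  | f, _, [], vis, e => (f, vis, e)
  | 0, _, _ :: _, vis, e => (0, vis, e)
  | f + 1, node, nb :: nbs, vis, e =>
    if PySem.Set.contains vis nb then dfsA ft f node nbs vis e
    else
      -- current_tree_edges.append((node, neighbor)); dfs(neighbor, …):
      -- visited.add(neighbor); if neighbor in flow_tree: loop over its neighbours
      let e' := e ++ [(node, nb)]
      let vis' := PySem.Set.add vis nb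
      let cn := ((PySem.Dict.mk ft).get? nb).getD []   -- 'if nb in flow_tree' else empty loop
      let r := dfsA ft f nb cn vis' e'
      dfsA ft (min r.1 f) node nbs r.2.1 r.2.2
  termination_by f => f
  decreasing_by
  · exact Nat.lt_succ_self f
  · exact Nat.lt_succ_self f
  · exact Nat.lt_succ_of_le (Nat.min_le_right _ _)

-- one iteration of 'for node in flow_tree: if node not in visited: …' (A)
def pvStepA (ft : List (Int × List Int))
    (st : PySem.Set Int × PySem.Dict Int (List (Int × Int))) (kv : Int × List Int) :
    PySem.Set Int × PySem.Dict Int (List (Int × Int)) :=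
  if PySem.Set.contains st.1 kv.1 then st
  else
    -- dfs(node, [], node): visited.add(node); if node in flow_tree: neighbour loop
    let vis1 := PySem.Set.add st.1 kv.1
    match (PySem.Dict.mk ft).get? kv.1 with
    | none => (vis1, st.2.insert kv.1 [])
    | some nbrs =>
      let r := dfsA ft (pvFuel ft) kv.1 nbrs vis1 []
      (r.2.1, st.2.insert kv.1 r.2.2)

def identify_trees (flow_tree : List (Int × List Int)) : List (Int × List (Int × Int)) :=
  (flow_tree.foldl (pvStepA flow_tree) (PySem.Set.empty, PySem.Dict.empty)).2.items

-- ===== PORT B =====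
-- Source B's 'while stack:' loop; a frame is (node, remaining part of its neighbour iterator).
-- Fuel is a totality guard (one unit per neighbour consumed from an iterator; popping an
-- exhausted frame is free, the stack length shrinks instead).
def runB (ft : List (Int × List Int)) :
    Nat → List (Int × List Int) → PySem.Set Int → List (Int × Int) →
    PySem.Set Int × List (Int × Int)
  | 0, _, vis, e => (vis, e)
  | _ + 1, [], vis, e => (vis, e)
  | f + 1, (_, []) :: rest, vis, e => runB ft (f + 1) rest vis e        -- next(it) is None: pop
  | f + 1, (node, nb :: nbs) :: rest, vis, e =>
    if PySem.Set.contains vis nb then runB ft f ((node, nbs) :: rest) vis e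
    else
      runB ft f ((nb, ((PySem.Dict.mk ft).get? nb).getD []) :: (node, nbs) :: rest)
        (PySem.Set.add vis nb) (e ++ [(node, nb)])
  termination_by f stack _ _ => (f, stack.length)

-- one iteration of 'for root in flow_tree:' (B)
def pvStepB (ft : List (Int × List Int))
    (st : PySem.Set Int × PySem.Dict Int (List (Int × Int))) (kv : Int × List Int) :
    PySem.Set Int × PySem.Dict Int (List (Int × Int)) :=
  if PySem.Set.contains st.1 kv.1 then st
  else
    let vis1 := PySem.Set.add st.1 kv.1
    let r := runB ft (pvFuel ft) [(kv.1, ((PySem.Dict.mk ft).get? kv.1).getD [])] vis1 []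
    (r.1, st.2.insert kv.1 r.2)

def identify_trees_alt (flow_tree : List (Int × List Int)) : List (Int × List (Int × Int)) :=
  (flow_tree.foldl (pvStepB flow_tree) (PySem.Set.empty, PySem.Dict.empty)).2.items

-- ===== PRECONDITION & SPEC =====
def Spec_identify_trees (flow_tree : List (Int × List Int)) (out : List (Int × List (Int × Int))) : Prop := out = identify_trees_alt flow_tree
instance (flow_tree : List (Int × List Int)) (out : List (Int × List (Int × Int))) : Decidable (Spec_identify_trees flow_tree out) := by unfold Spec_identify_trees; infer_instance

-- ===== CLAIM (what is proved, stated in full; the proofs are below) =====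
def Claim_equal_identify_trees : Prop := ∀ (flow_tree : List (Int × List Int)), Dom_identify_trees flow_tree → Spec_identify_trees flow_tree (identify_trees flow_tree)

-- ===== LEMMAS AND PROOFS =====

theorem pvDfsA_fuel_le (ft : List (Int × List Int)) (f : Nat) (node : Int)
    (nbs : List Int) (vis : PySem.Set Int) (e : List (Int × Int)) :
    (dfsA ft f node nbs vis e).1 ≤ f := by
  induction f using Nat.strong_induction_on generalizing node nbs vis e with
  | _ f ih =>
    cases nbs with
    | nil => simp [dfsA]
    | cons nb nbs =>
      cases f with
      | zero => simp [dfsA]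
      | succ g =>
        rw [dfsA]
        by_cases h : PySem.Set.contains vis nb
        · simp only [h, if_true]
          exact (ih g (Nat.lt_succ_self g) node nbs vis e).trans (Nat.le_succ g)
        · simp only [h]
          exact (ih _ (Nat.lt_succ_of_le (Nat.min_le_right _ _)) node nbs _ _).trans
            ((Nat.min_le_right _ _).trans (Nat.le_succ g))

theorem pvRunB_nil (ft : List (Int × List Int)) (f : Nat) (vis : PySem.Set Int)
    (e : List (Int × Int)) : runB ft f [] vis e = (vis, e) := by
  cases f <;> simp [runB]

-- the simulation: running the machine on a frame (node, nbs) on top of 'rest' is A's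
-- neighbour loop for (node, nbs) followed by the machine on 'rest'
theorem pvSim (ft : List (Int × List Int)) (f : Nat) (node : Int) (nbs : List Int)
    (vis : PySem.Set Int) (e : List (Int × Int)) (rest : List (Int × List Int)) :
    runB ft f ((node, nbs) :: rest) vis e =
      (let r := dfsA ft f node nbs vis e; runB ft r.1 rest r.2.1 r.2.2) := by
  induction f using Nat.strong_induction_on generalizing node nbs vis e rest with
  | _ f ih =>
    cases nbs with
    | nil =>
      cases f with
      | zero => simp [dfsA, runB]
      | succ g => simp [dfsA, runB]
    | cons nb nbs =>
      cases f with
      | zero => simp [dfsA, runB]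
      | succ g =>
        rw [dfsA, runB]
        by_cases h : PySem.Set.contains vis nb
        · simp only [h, if_true]
          exact ih g (Nat.lt_succ_self g) node nbs vis e rest
        · simp only [h]
          rw [ih g (Nat.lt_succ_self g) nb _ _ _ ((node, nbs) :: rest)]
          simp only []
          have hle : (dfsA ft g nb (((PySem.Dict.mk ft).get? nb).getD [])
              (PySem.Set.add vis nb) (e ++ [(node, nb)])).1 ≤ g :=
            pvDfsA_fuel_le ft g nb _ _ _
          rw [Nat.min_eq_left hle]
          exact ih _ (Nat.lt_succ_of_le hle) node nbs _ _ rest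

theorem pvStep_eq (ft : List (Int × List Int)) :
    pvStepA ft = pvStepB ft := by
  funext st kv
  unfold pvStepA pvStepB
  by_cases h : PySem.Set.contains st.1 kv.1
  · simp only [h, if_true]
  · simp only [h]
    cases hg : (PySem.Dict.mk ft).get? kv.1 with
    | none =>
        simp only [Option.getD_none]
        rw [pvSim ft (pvFuel ft) kv.1 [] _ _ []]
        simp [dfsA, pvRunB_nil]
    | some nbrs =>
        simp only [Option.getD_some]
        rw [pvSim ft (pvFuel ft) kv.1 nbrs _ _ []]
        simp [pvRunB_nil]

-- ===== VERDICT (by name: the statement is the Claim_ definition above) =====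
theorem identify_trees_spec : Claim_equal_identify_trees := by
  intro ft _
  unfold Spec_identify_trees identify_trees identify_trees_alt
  rw [pvStep_eq]
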